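-- pv_equiv track=rewrite | github.com/TheJoshBrod/KernelForge | src/apple_silicon/benchmark.py | _expand_prompt_to_target
-- ===== SOURCE A (Python) =====
-- def _approx_token_count(text: str) -> int:
--     # Coarse deterministic estimate for prompt expansion when tokenizer is unavailable.
--     return max(1, int(len(text) / 4))
--
-- def _expand_prompt_to_target(base_prompt: str, target_tokens: int) -> str:
--     prompt = base_prompt.strip()
--     if target_tokens <= 0:
--         return prompt
--     est_tokens = _approx_token_count(prompt)
--     parts: list[str] = [prompt]
--     while est_tokens < target_tokens:
--         parts.append(prompt)
--         est_tokens += _approx_token_count(prompt)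
--         if len(parts) > 4096:
--             break
--     return "\n\n".join(parts)
-- ===== SOURCE B (Python) =====
-- def _approx_token_count(text: str) -> int:
--     return max(1, int(len(text) / 4))
--
-- def _expand_prompt_to_target(base_prompt: str, target_tokens: int) -> str:
--     prompt = base_prompt.strip()
--     if target_tokens <= 0:
--         return prompt
--     per = _approx_token_count(prompt)
--     copies = min(4097, -(-target_tokens // per))
--     return "\n\n".join([prompt] * copies)
-- ===== Notes on version B (the rewrite author's own statement) =====
-- stated objective: simpler
-- what changed: Replaces the incremental while-loop that appends one copy at a time with a closed-form copy count min(4097, ceil(target/per)) computed by integer arithmetic and a single join over a replicated list.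
import Mathlib
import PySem

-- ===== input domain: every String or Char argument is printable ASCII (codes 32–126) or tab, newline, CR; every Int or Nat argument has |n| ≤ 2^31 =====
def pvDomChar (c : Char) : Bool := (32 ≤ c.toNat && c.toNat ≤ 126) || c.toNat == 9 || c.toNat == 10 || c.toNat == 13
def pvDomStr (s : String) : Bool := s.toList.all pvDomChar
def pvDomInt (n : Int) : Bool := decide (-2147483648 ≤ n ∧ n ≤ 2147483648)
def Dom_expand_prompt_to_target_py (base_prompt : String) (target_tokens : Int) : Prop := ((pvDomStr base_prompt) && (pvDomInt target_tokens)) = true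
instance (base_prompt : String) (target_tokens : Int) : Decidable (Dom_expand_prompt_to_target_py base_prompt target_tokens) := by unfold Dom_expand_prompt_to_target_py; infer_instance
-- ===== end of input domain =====

-- B replaces A's copy-appending while-loop by a closed-form copy count and a single join (simpler).

-- ===== PORT A =====
-- _approx_token_count: int(len(text)/4) is exact integer floor division since len ≥ 0 and 4 is a power of two
def pvApprox (text : String) : Int := max 1 (PySem.Int.floordiv (PySem.Str.len text) 4)

-- the while-loop of A; terminates because parts grows each iteration and recursion requires length ≤ 4096
def pvLoopA (prompt : String) (per target : Int) (est : Int) (parts : List String) : List String :=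
  if est < target then
    if (parts ++ [prompt]).length > 4096 then parts ++ [prompt]
    else pvLoopA prompt per target (est + per) (parts ++ [prompt])
  else parts
termination_by 4097 - parts.length
decreasing_by simp only [List.length_append, List.length_cons, List.length_nil] at *; omega

def expand_prompt_to_target_py (base_prompt : String) (target_tokens : Int) : String :=
  let prompt := PySem.Str.strip base_prompt
  if target_tokens ≤ 0 then prompt
  else
    let est := pvApprox prompt
    let parts : List String := [prompt]
    PySem.Str.join "\n\n" (pvLoopA prompt (pvApprox prompt) target_tokens est parts)

-- ===== PORT B =====
def pvApproxAlt (text : String) : Int := max 1 (PySem.Int.floordiv (PySem.Str.len text) 4)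

def expand_prompt_to_target_py_alt (base_prompt : String) (target_tokens : Int) : String :=
  let prompt := PySem.Str.strip base_prompt
  if target_tokens ≤ 0 then prompt
  else
    let per := pvApproxAlt prompt
    let copies := min 4097 (-(PySem.Int.floordiv (-target_tokens) per))
    PySem.Str.join "\n\n" (List.replicate copies.toNat prompt)

-- ===== PRECONDITION & SPEC =====
def Spec_expand_prompt_to_target_py (base_prompt : String) (target_tokens : Int) (out : String) : Prop := out = expand_prompt_to_target_py_alt base_prompt target_tokens
instance (base_prompt : String) (target_tokens : Int) (out : String) : Decidable (Spec_expand_prompt_to_target_py base_prompt target_tokens out) := by unfold Spec_expand_prompt_to_target_py; infer_instance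

-- ===== CLAIM (what is proved, stated in full; the proofs are below) =====
def Claim_equal_expand_prompt_to_target_py : Prop := ∀ (base_prompt : String) (target_tokens : Int), Dom_expand_prompt_to_target_py base_prompt target_tokens → Spec_expand_prompt_to_target_py base_prompt target_tokens (expand_prompt_to_target_py base_prompt target_tokens)

-- ===== LEMMAS AND PROOFS =====

-- invariant: after c copies (1 ≤ c ≤ 4096, c ≤ m) with est = c*per, the loop ends with min 4097 m copies,
-- where m is the ceiling of target/per, characterised by (m-1)*per < target ≤ m*per
theorem pvLoop_spec (prompt : String) (per target m : Int) (hp : 0 < per)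
    (hm1 : (m - 1) * per < target) (hm2 : target ≤ m * per) :
    ∀ (k c : Nat), (target - (c : Int) * per).toNat ≤ k → 1 ≤ c → c ≤ 4096 → (c : Int) ≤ m →
    pvLoopA prompt per target ((c : Int) * per) (List.replicate c prompt)
      = List.replicate (min 4097 m).toNat prompt := by
  intro k
  induction k with
  | zero =>
    intro c hk h1 h2 h3
    have hstop : ¬ ((c : Int) * per < target) := by omega
    rw [pvLoopA.eq_def, if_neg hstop]
    have hmc : m - 1 < (c : Int) := by nlinarith
    congr 1
    omega
  | succ k ih =>
    intro c hk h1 h2 h3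
    by_cases h : (c : Int) * per < target
    · have hcm : (c : Int) < m := by nlinarith
      rw [pvLoopA.eq_def, if_pos h]
      simp only [← List.replicate_succ', List.length_replicate]
      by_cases hlen : c + 1 > 4096
      · rw [if_pos hlen]
        congr 1
        omega
      · rw [if_neg hlen]
        have hcast : (c : Int) * per + per = ((c + 1 : Nat) : Int) * per := by push_cast; ring
        rw [hcast]
        apply ih
        · have he : ((c + 1 : Nat) : Int) * per = (c : Int) * per + per := by push_cast; ring
          rw [he]
          generalize (c : Int) * per = e at hk ⊢
          omega
        · omega
        · omega
        · push_cast; omega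
    · rw [pvLoopA.eq_def, if_neg h]
      have hmc : m - 1 < (c : Int) := by nlinarith
      congr 1
      omega

theorem expand_prompt_to_target_py_spec : Claim_equal_expand_prompt_to_target_py := by
  intro bp t _
  unfold Spec_expand_prompt_to_target_py expand_prompt_to_target_py expand_prompt_to_target_py_alt
  by_cases ht : t ≤ 0
  · simp [ht]
  · simp only [if_neg ht]
    have ht1 : 1 ≤ t := by omega
    set prompt := PySem.Str.strip bp with hprompt
    have hper : 0 < pvApprox prompt := lt_of_lt_of_le one_pos (le_max_left 1 _)
    set per := pvApprox prompt with hperdef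
    set m := -(PySem.Int.floordiv (-t) per) with hmdef
    have hm := (PySem.Int.neg_floordiv_neg_eq_iff_of_pos (a := t) (b := per) (q := m) hper).mp rfl
    have hm1 : 1 ≤ m := by nlinarith [hm.2]
    have halt : pvApproxAlt prompt = per := rfl
    have := pvLoop_spec prompt per t m hper hm.1 hm.2 (t - 1 * per).toNat 1 (by omega)
      (by omega) (by omega) (by exact_mod_cast hm1)
    simp only [Nat.cast_one, one_mul, List.replicate_one] at this
    rw [halt, ← hmdef, this]
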